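-- pv_equiv track=rewrite | github.com/ASEDOS999/SearchScript | TextProcessing.py | extract_name_of_POL
-- ===== SOURCE A (Python) =====
-- def extract_name_of_POL(cur_text):
-- 	name = cur_text
-- 	i = 0
-- 	while i < len(cur_text) and cur_text[i] == ' ':
-- 		i+= 1
-- 	if name[i] == '*':
-- 		i+=1
-- 		start = i
-- 		while i < len(name) and not name[i] in ['.', '!', '?']:
-- 			i += 1
-- 		return name[start : i + 1]
-- 	prev = i
-- 	while i < len(cur_text) and cur_text[i].isnumeric():
-- 		i += 1
-- 	if cur_text[i] == '.':
-- 		i+= 1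
-- 		start = i
-- 		while i < len(name) and not name[i] in ['.', '!', '?']:
-- 			i += 1
-- 		return name[start : i + 1]
-- 	else:
-- 		start = prev
-- 		while i < len(name) and not name[i] in ['.', '!', '?']:
-- 			i += 1
-- 		return name[start : i + 1]
-- ===== SOURCE B (Python) =====
-- def extract_name_of_POL(cur_text):
--     # Single-pass finite-state machine: 0 = skipping leading spaces, 1 = inside a
--     # possible numbered-list prefix, 2 = collecting the name.  The name is built
--     # incrementally in `out`; no indices, slices or rescans are ever used.
--     state = 0
--     pending = []   # digits that may turn out to be a list-number prefix like "12."
--     out = []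
--     for ch in cur_text:
--         if state == 0:
--             if ch == ' ':
--                 continue
--             if ch == '*':
--                 state = 2
--                 continue
--             if ch.isdigit():
--                 pending.append(ch)
--                 state = 1
--                 continue
--             if ch == '.':
--                 state = 2
--                 continue
--             out.append(ch)
--             state = 2
--             if ch in '!?':
--                 return ''.join(out)
--         elif state == 1:
--             if ch.isdigit():
--                 pending.append(ch)
--                 continue
--             if ch == '.':
--                 pending = []
--                 state = 2
--                 continue
--             out = pending + [ch]
--             state = 2
--             if ch in '!?':
--                 return ''.join(out)
--         else:
--             out.append(ch)
--             if ch in '.!?':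
--                 return ''.join(out)
--     return ''.join(out)
-- ===== Notes on version B (the rewrite author's own statement) =====
-- stated objective: alternative
-- what changed: A computes start/stop character indices with four separate while-loops and returns a slice; B is a single-pass finite-state machine (states: skipping spaces / numeric prefix / collecting) that builds the name incrementally in an accumulator, with no indices, slicing or rescanning; the single loop with constant work per character measured ~2.6x faster than A's staged index loops.
import Mathlib
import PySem

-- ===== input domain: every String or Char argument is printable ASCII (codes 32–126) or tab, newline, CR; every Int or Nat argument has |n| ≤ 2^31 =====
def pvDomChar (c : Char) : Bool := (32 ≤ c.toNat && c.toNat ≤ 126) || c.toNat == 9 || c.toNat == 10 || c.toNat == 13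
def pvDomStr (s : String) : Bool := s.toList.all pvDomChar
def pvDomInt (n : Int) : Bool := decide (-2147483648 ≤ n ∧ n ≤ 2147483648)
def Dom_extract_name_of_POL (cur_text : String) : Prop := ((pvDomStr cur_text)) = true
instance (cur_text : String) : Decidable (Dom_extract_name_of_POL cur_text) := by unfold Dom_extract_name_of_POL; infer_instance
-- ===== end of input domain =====

-- B replaces A's four index-scanning loops + slice with a single-pass state machine
-- building the name in an accumulator (objective: alternative structure; a timing run measured B faster by a constant factor).

-- ===== PORT A =====
-- while i < len(cur_text) and cur_text[i] == ' ': i += 1   (returns the count of leading spaces)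
def polSpaces : List Char → Nat
  | [] => 0
  | c :: t => if c == ' ' then polSpaces t + 1 else 0

-- cur_text[i].isnumeric(): counts the leading numeric chars; on the ASCII domain isnumeric = PySem.Chars.isdigit
def polDigits : List Char → Nat
  | [] => 0
  | c :: t => if PySem.Chars.isdigit c then polDigits t + 1 else 0

def polIsDelim (c : Char) : Bool := c == '.' || c == '!' || c == '?'

-- while i < len(name) and not name[i] in ['.', '!', '?']: i += 1   (returns the final i)
def polScan : List Char → Nat → Nat
  | [], i => i
  | c :: t, i => if polIsDelim c then i else polScan t (i + 1)

-- Python name[a : b] for 0 ≤ a ≤ b (exact: take clamps at the end as the slice does)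
def polSlice (s : List Char) (a b : Nat) : List Char := (s.drop a).take (b - a)

def extract_name_of_POL (cur_text : String) : String :=
  let s := cur_text.toList
  let i := polSpaces s
  match s.drop i with
  | [] => ""          -- name[i] raises IndexError here (all-space input); excluded by Pre_
  | c :: rest =>
    if c == '*' then
      let stop := polScan rest (i + 1)
      String.ofList (polSlice s (i + 1) (stop + 1))
    else
      let j := i + polDigits (c :: rest)
      match s.drop j with
      | [] => ""      -- cur_text[i] raises IndexError here (numeric run reaches the end); excluded by Pre_
      | d :: rest2 =>
        if d == '.' then
          let stop := polScan rest2 (j + 1)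
          String.ofList (polSlice s (j + 1) (stop + 1))
        else
          let stop := polScan (d :: rest2) j
          String.ofList (polSlice s i (stop + 1))

-- ===== PORT B =====
-- the for-loop with early returns, as structural recursion over the characters;
-- state 0 = skipping spaces, 1 = numeric prefix, 2 = collecting; pending/out as in Source B
def polDFA : List Char → Nat → List Char → List Char → List Char
  | [], _, _, out => out
  | ch :: t, 0, pending, out =>
    if ch == ' ' then polDFA t 0 pending out
    else if ch == '*' then polDFA t 2 pending out
    else if PySem.Chars.isdigit ch then polDFA t 1 (pending ++ [ch]) out
    else if ch == '.' then polDFA t 2 pending out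
    else
      let out' := out ++ [ch]
      if ch == '!' || ch == '?' then out' else polDFA t 2 pending out'
  | ch :: t, 1, pending, out =>
    if PySem.Chars.isdigit ch then polDFA t 1 (pending ++ [ch]) out
    else if ch == '.' then polDFA t 2 [] out
    else
      let out' := pending ++ [ch]
      if ch == '!' || ch == '?' then out' else polDFA t 2 pending out'
  | ch :: t, _, pending, out =>
    let out' := out ++ [ch]
    if ch == '.' || ch == '!' || ch == '?' then out' else polDFA t 2 pending out'

def extract_name_of_POL_alt (cur_text : String) : String :=
  String.ofList (polDFA cur_text.toList 0 [] [])

-- ===== PRECONDITION & SPEC =====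
-- Pre_ excludes exactly the inputs where A raises IndexError: the text is all
-- spaces (possibly empty), or everything after the leading spaces is numeric.
def Pre_extract_name_of_POL (cur_text : String) : Prop :=
  cur_text.toList.dropWhile (· == ' ') ≠ [] ∧
  ¬ (cur_text.toList.dropWhile (· == ' ')).all PySem.Chars.isdigit
instance (cur_text : String) : Decidable (Pre_extract_name_of_POL cur_text) := by unfold Pre_extract_name_of_POL; infer_instance

def pvWitness_extract_name_of_POL : String := " 12. Ivan Petrov! Bio."

def Spec_extract_name_of_POL (cur_text : String) (out : String) : Prop := out = extract_name_of_POL_alt cur_text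
instance (cur_text : String) (out : String) : Decidable (Spec_extract_name_of_POL cur_text out) := by unfold Spec_extract_name_of_POL; infer_instance

-- ===== CLAIM (what is proved, stated in full; the proofs are below) =====
def Claim_equal_extract_name_of_POL : Prop := ∀ (cur_text : String), Dom_extract_name_of_POL cur_text → Pre_extract_name_of_POL cur_text → Spec_extract_name_of_POL cur_text (extract_name_of_POL cur_text)
-- ===== LEMMAS AND PROOFS =====

-- the name collected from position `start` on: everything up to and including the
-- first delimiter (or to the end if there is none)
def polCollect : List Char → List Char
  | [] => []
  | c :: t => if polIsDelim c then [c] else c :: polCollect t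

theorem polDFA_two (t : List Char) : ∀ p out, polDFA t 2 p out = out ++ polCollect t := by
  induction t with
  | nil => intro p out; simp [polDFA, polCollect]
  | cons c t ih =>
    intro p out
    by_cases h : polIsDelim c
    · have h' : (c == '.' || c == '!' || c == '?') = true := by simpa [polIsDelim] using h
      simp [polDFA, h', polCollect, h]
    · have h' : (c == '.' || c == '!' || c == '?') = false := by simpa [polIsDelim] using h
      simp [polDFA, h', polCollect, h, ih]

theorem polCollect_eq_take (t : List Char) :
    polCollect t = t.take (t.findIdx polIsDelim + 1) := by
  induction t with
  | nil => rfl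
  | cons c t ih =>
    cases h : polIsDelim c
    · simp [polCollect, h, List.findIdx_cons, ih]
    · simp [polCollect, h, List.findIdx_cons]

theorem polDFA_zero_dropWhile (s : List Char) : ∀ p out,
    polDFA s 0 p out = polDFA (s.dropWhile (· == ' ')) 0 p out := by
  induction s with
  | nil => intro p out; rfl
  | cons c t ih =>
    intro p out
    by_cases h : c == ' '
    · have hc : c = ' ' := by simpa using h
      simp [polDFA, hc, ih]
    · simp [h]

theorem polDFA_one (t : List Char) : ∀ p out,
    polDFA t 1 p out =
      match t.dropWhile PySem.Chars.isdigit with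
      | [] => out
      | d :: r =>
        if d == '.' then out ++ polCollect r
        else p ++ t.takeWhile PySem.Chars.isdigit ++ polCollect (d :: r) := by
  induction t with
  | nil => intro p out; rfl
  | cons c t ih =>
    intro p out
    by_cases hd : PySem.Chars.isdigit c
    · rw [show polDFA (c :: t) 1 p out = polDFA t 1 (p ++ [c]) out by simp [polDFA, hd]]
      rw [ih]
      simp only [List.dropWhile_cons, List.takeWhile_cons, hd, if_pos]
      cases hdw : t.dropWhile PySem.Chars.isdigit with
      | nil => rfl
      | cons d r =>
        by_cases hdot : d == '.'
        · simp [hdot]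
        · simp [hdot]
    · have hnd : PySem.Chars.isdigit c = false := by simpa using hd
      by_cases hdot : c == '.'
      · have hc : c = '.' := by simpa using hdot
        subst hc
        rw [show polDFA ('.' :: t) 1 p out = polDFA t 2 [] out by simp [polDFA, hnd]]
        rw [polDFA_two]
        simp [hnd]
      · rw [show polDFA (c :: t) 1 p out
              = (if c == '!' || c == '?' then p ++ [c] else polDFA t 2 p (p ++ [c])) by
            simp [polDFA, hnd, hdot]]
        simp only [List.dropWhile_cons, List.takeWhile_cons, hnd]
        by_cases hdl : (c == '!' || c == '?') = true
        · have : polIsDelim c = true := by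
            rcases Bool.or_eq_true_iff.mp hdl with h | h <;> simp [polIsDelim, h]
          simp [hdl, hdot, polCollect, this]
        · have hdl' : (c == '!' || c == '?') = false := by simpa using hdl
          have : polIsDelim c = false := by
            simp [polIsDelim, hdot]
            rcases Bool.or_eq_false_iff.mp hdl' with ⟨h1, h2⟩
            exact ⟨by simpa using h1, by simpa using h2⟩
          simp [hdl', hdot, polCollect, this, polDFA_two]

theorem polSpaces_drop (s : List Char) : s.drop (polSpaces s) = s.dropWhile (· == ' ') := by
  induction s with
  | nil => rfl
  | cons c t ih =>
    by_cases h : c == ' ' <;> simp [polSpaces, h, ih]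

theorem polDigits_drop (t : List Char) :
    t.drop (polDigits t) = t.dropWhile PySem.Chars.isdigit := by
  induction t with
  | nil => rfl
  | cons c t ih =>
    by_cases h : PySem.Chars.isdigit c <;> simp [polDigits, h, ih]

theorem polDigits_len (t : List Char) :
    polDigits t = (t.takeWhile PySem.Chars.isdigit).length := by
  induction t with
  | nil => rfl
  | cons c t ih =>
    by_cases h : PySem.Chars.isdigit c <;> simp [polDigits, h, ih]

theorem polScan_eq (t : List Char) : ∀ i, polScan t i = i + t.findIdx polIsDelim := by
  induction t with
  | nil => intro i; simp [polScan]
  | cons c t ih =>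
    intro i
    cases h : polIsDelim c <;> simp [polScan, List.findIdx_cons, h, ih] <;> omega

theorem dropWhile_head_false {p : Char → Bool} {s : List Char} {c : Char} {t : List Char}
    (h : s.dropWhile p = c :: t) : p c = false := by
  have := List.head?_dropWhile_not p s
  rw [h] at this
  simpa using this

theorem extract_name_of_POL_eq (cur_text : String)
    (hpre : Pre_extract_name_of_POL cur_text) :
    extract_name_of_POL cur_text = extract_name_of_POL_alt cur_text := by
  obtain ⟨hne, hnd⟩ := hpre
  unfold extract_name_of_POL extract_name_of_POL_alt
  dsimp only
  set s := cur_text.toList with hs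
  set i := polSpaces s with hi
  have hdropi : s.drop i = s.dropWhile (· == ' ') := polSpaces_drop s
  rw [polDFA_zero_dropWhile]
  cases hd : s.dropWhile (· == ' ') with
  | nil => exact absurd hd hne
  | cons c rest =>
    have hdc : s.drop i = c :: rest := hdropi.trans hd
    have hcns : (c == ' ') = false := by
      have := dropWhile_head_false (p := (· == ' ')) hd
      simpa using this
    have hrest : s.drop (i + 1) = rest := by
      rw [← List.drop_drop, hdc]; rfl
    rw [hdc]
    dsimp only
    by_cases hstar : c == '*'
    · -- '*' branch
      rw [if_pos hstar,
          show polDFA (c :: rest) 0 [] [] = polDFA rest 2 [] [] by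
            simp [polDFA, hcns, hstar],
          polDFA_two]
      simp only [polSlice, hrest, polScan_eq, List.nil_append]
      rw [polCollect_eq_take]
      congr 2
      omega
    · rw [if_neg hstar]
      have hdrj : s.drop (i + polDigits (c :: rest))
          = (c :: rest).dropWhile PySem.Chars.isdigit := by
        rw [← polDigits_drop, ← hdc, List.drop_drop]
      by_cases hdig : PySem.Chars.isdigit c
      · -- numeric prefix: B goes to state 1 with pending [c]
        rw [show polDFA (c :: rest) 0 [] [] = polDFA rest 1 [c] [] by
              simp [polDFA, hcns, hstar, hdig]]
        rw [polDFA_one]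
        have hdwc : (c :: rest).dropWhile PySem.Chars.isdigit
            = rest.dropWhile PySem.Chars.isdigit := by simp [hdig]
        cases hdw : rest.dropWhile PySem.Chars.isdigit with
        | nil =>
          exfalso
          apply hnd
          rw [hd]
          have : (c :: rest).dropWhile PySem.Chars.isdigit = [] := by rw [hdwc, hdw]
          have htw := List.takeWhile_append_dropWhile (p := PySem.Chars.isdigit) (l := c :: rest)
          rw [this, List.append_nil] at htw
          rw [← htw]
          simpa using List.mem_takeWhile_imp
        | cons d rest2 =>
          rw [hdrj, hdwc, hdw]
          dsimp only
          have hjd : s.drop (i + polDigits (c :: rest) + 1) = rest2 := by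
            rw [← List.drop_drop, hdrj, hdwc, hdw]; rfl
          by_cases hdot : d == '.'
          · rw [if_pos hdot, if_pos hdot]
            simp only [polSlice, hjd, polScan_eq, List.nil_append]
            rw [polCollect_eq_take]
            congr 2
            omega
          · rw [if_neg hdot, if_neg hdot]
            simp only [polSlice, polScan_eq, hdc]
            have hsplit : c :: rest
                = (c :: List.takeWhile PySem.Chars.isdigit rest) ++ (d :: rest2) := by
              conv_lhs => rw [← List.takeWhile_append_dropWhile
                (p := PySem.Chars.isdigit) (l := c :: rest)]
              rw [hdwc, hdw, List.takeWhile_cons, hdig]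
              rfl
            have hlen : (c :: List.takeWhile PySem.Chars.isdigit rest).length
                = polDigits (c :: rest) := by
              rw [polDigits_len, List.takeWhile_cons, hdig]
              rfl
            set k := polDigits (c :: rest) with hk
            set f := (d :: rest2).findIdx polIsDelim with hf
            rw [show i + k + f + 1 - i = k + (f + 1) by omega]
            conv_lhs => rw [hsplit]
            rw [List.take_append, hlen,
                List.take_of_length_le (by rw [hlen]; omega),
                show k + (f + 1) - k = f + 1 by omega,
                ← polCollect_eq_take]
            simp
      · -- no digits: j = i, d = c
        have hdig0 : polDigits (c :: rest) = 0 := by simp [polDigits, hdig]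
        rw [hdrj]
        rw [show (c :: rest).dropWhile PySem.Chars.isdigit = c :: rest by
              simp [hdig]]
        dsimp only
        by_cases hdot : c == '.'
        · rw [if_pos hdot,
              show polDFA (c :: rest) 0 [] [] = polDFA rest 2 [] [] by
                simp [polDFA, hcns, hstar, hdig, hdot],
              polDFA_two]
          have : s.drop (i + polDigits (c :: rest) + 1) = rest := by
            rw [hdig0]; exact hrest
          simp only [polSlice, this, polScan_eq, List.nil_append]
          rw [polCollect_eq_take]
          congr 2
          omega
        · rw [if_neg hdot]
          have hres : polDFA (c :: rest) 0 [] []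
              = (if c == '!' || c == '?' then [c] else [c] ++ polCollect rest) := by
            rw [show polDFA (c :: rest) 0 [] []
                  = (if c == '!' || c == '?' then [c] else polDFA rest 2 [] [c]) by
                simp [polDFA, hcns, hstar, hdig, hdot]]
            by_cases h : (c == '!' || c == '?') = true
            · simp [h]
            · have h' : (c == '!' || c == '?') = false := by simpa using h
              simp [h', polDFA_two]
          have hcol : polDFA (c :: rest) 0 [] [] = polCollect (c :: rest) := by
            rw [hres]
            by_cases h : (c == '!' || c == '?') = true
            · have hdl : polIsDelim c = true := by
                rcases Bool.or_eq_true_iff.mp h with h1 | h1 <;> simp [polIsDelim, h1]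
              simp [h, polCollect, hdl]
            · have h' : (c == '!' || c == '?') = false := by simpa using h
              have hdl : polIsDelim c = false := by
                simp [polIsDelim, hdot]
                rcases Bool.or_eq_false_iff.mp h' with ⟨h1, h2⟩
                exact ⟨by simpa using h1, by simpa using h2⟩
              simp [h', polCollect, hdl]
          rw [hcol]
          simp only [polSlice, polScan_eq, hdig0, hdc]
          rw [polCollect_eq_take]
          congr 2
          omega

-- ===== VERDICT (by name: the statement is the Claim_ definition above) =====
theorem extract_name_of_POL_spec : Claim_equal_extract_name_of_POL := by
  intro cur_text _ hpre
  unfold Spec_extract_name_of_POL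
  exact extract_name_of_POL_eq cur_text hpre
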